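-- pv_equiv track=rewrite | github.com/Dae-yangKim/BOJ_2 | python_4/5393.py | calc
-- ===== SOURCE A (Python) =====
-- def calc(num : int):
--     data = {}
--     count : int = 0
--     for i in range(1 , num + 1):
--         if i % 2 == 0 and (i // 2) not in data.values():
--             data[i] = i // 2
--             count += 1
--         elif i % 2 != 0 and (3 * i + 1) not in data.values():
--             data[i] = 3 * i + 1
--             count += 1
--         else:
--             count -= 1
--
--     return count
-- ===== SOURCE B (Python) =====
-- def calc(num: int):
--     vals = [i // 2 if i % 2 == 0 else 3 * i + 1 for i in range(1, num + 1)]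
--     return 2 * len(set(vals)) - len(vals)
-- ===== Notes on version B (the rewrite author's own statement) =====
-- stated objective: faster
-- what changed: Replaces A's per-element linear scan of dict.values() with building the value list once and taking an aggregate of its length and its distinct-element count, since each first occurrence raises the count and each duplicate lowers it.
import Mathlib
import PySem

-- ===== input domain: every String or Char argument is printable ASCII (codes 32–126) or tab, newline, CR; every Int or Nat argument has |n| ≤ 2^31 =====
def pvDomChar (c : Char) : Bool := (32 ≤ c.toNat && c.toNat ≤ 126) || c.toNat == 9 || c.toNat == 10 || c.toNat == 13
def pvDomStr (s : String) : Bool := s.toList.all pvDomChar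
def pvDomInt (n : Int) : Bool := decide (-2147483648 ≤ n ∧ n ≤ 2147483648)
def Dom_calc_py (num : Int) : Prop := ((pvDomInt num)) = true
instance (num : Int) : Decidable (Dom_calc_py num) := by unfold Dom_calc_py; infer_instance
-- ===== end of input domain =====

-- B replaces A's per-iteration scan of dict.values() with one aggregate over the value list (distinct count vs total count).


-- ===== PORT A =====
-- one loop iteration: the two dict-membership branches of A, in order
def calcStep (s : PySem.Dict Int Int × Int) (i : Int) : PySem.Dict Int Int × Int :=
  if PySem.Int.mod i 2 = 0 ∧ PySem.Int.floordiv i 2 ∉ s.1.values then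
    (s.1.insert i (PySem.Int.floordiv i 2), s.2 + 1)
  else if PySem.Int.mod i 2 ≠ 0 ∧ (3 * i + 1) ∉ s.1.values then
    (s.1.insert i (3 * i + 1), s.2 + 1)
  else
    (s.1, s.2 - 1)

def calc_py (num : Int) : Int :=
  ((PySem.List.pyRange 1 (num + 1) 1).foldl calcStep (PySem.Dict.empty, 0)).2

-- ===== PORT B =====
-- the computed value of index i (the comprehension body of Source B)
def calcVal (i : Int) : Int :=
  if PySem.Int.mod i 2 = 0 then PySem.Int.floordiv i 2 else 3 * i + 1

def calc_py_alt (num : Int) : Int :=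
  let vals := (PySem.List.pyRange 1 (num + 1) 1).map calcVal
  2 * ((PySem.Set.ofList vals).length : Int) - (vals.length : Int)

-- ===== PRECONDITION & SPEC =====
def Spec_calc_py (num : Int) (out : Int) : Prop := out = calc_py_alt num
instance (num : Int) (out : Int) : Decidable (Spec_calc_py num out) := by unfold Spec_calc_py; infer_instance

-- ===== CLAIM (what is proved, stated in full; the proofs are below) =====
def Claim_equal_calc_py : Prop := ∀ (num : Int), Dom_calc_py num → Spec_calc_py num (calc_py num)


-- ===== LEMMAS AND PROOFS =====

-- the two branches of A's step collapse to: membership of the computed value decides +1 / -1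
theorem step_dup (d : PySem.Dict Int Int) (c i : Int) (hmem : calcVal i ∈ d.values) :
    calcStep (d, c) i = (d, c - 1) := by
  unfold calcStep calcVal at *
  have hf : PySem.Int.floordiv i 2 = i / 2 := PySem.Int.floordiv_eq_ediv_of_pos (by norm_num)
  by_cases h2 : PySem.Int.mod i 2 = 0
  · have hd : (2:Int) ∣ i := (PySem.Int.mod_eq_zero_iff_dvd i 2).mp h2
    rw [if_pos h2, hf] at hmem
    simp [hd, hmem]
  · have hnd : ¬ (2:Int) ∣ i := fun h => h2 ((PySem.Int.mod_eq_zero_iff_dvd i 2).mpr h)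
    rw [if_neg h2] at hmem
    simp [hnd, hmem]

theorem step_new (d : PySem.Dict Int Int) (c i : Int) (hmem : calcVal i ∉ d.values) :
    calcStep (d, c) i = (d.insert i (calcVal i), c + 1) := by
  unfold calcStep calcVal at *
  have hf : PySem.Int.floordiv i 2 = i / 2 := PySem.Int.floordiv_eq_ediv_of_pos (by norm_num)
  by_cases h2 : PySem.Int.mod i 2 = 0
  · have hd : (2:Int) ∣ i := (PySem.Int.mod_eq_zero_iff_dvd i 2).mp h2
    rw [if_pos h2] at hmem
    rw [hf] at hmem ⊢
    simp [hd, hmem]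
  · have hnd : ¬ (2:Int) ∣ i := fun h => h2 ((PySem.Int.mod_eq_zero_iff_dvd i 2).mpr h)
    rw [if_neg h2] at hmem ⊢
    simp [hnd, hmem]

-- the loop invariant: the final count is c + 2*(new distinct values) - (iterations)
theorem calc_loop_count (l : List Int) : ∀ (d : PySem.Dict Int Int) (c : Int),
    (∀ i ∈ l, d.contains i = false) → l.Nodup →
    (l.foldl calcStep (d, c)).2
      = c + 2 * (((PySem.Set.update (PySem.Set.ofList d.values) (l.map calcVal)).length : Int)
                 - ((PySem.Set.ofList d.values).length : Int)) - l.length := by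
  induction l with
  | nil => intro d c _ _; simp [PySem.Set.update_nil]
  | cons i rest ih =>
    intro d c hfresh hnd
    have hdi : d.contains i = false := hfresh i (by simp)
    have hrest : ∀ j ∈ rest, d.contains j = false := fun j hj => hfresh j (by simp [hj])
    have hndrest : rest.Nodup := hnd.of_cons
    have hinotin : i ∉ rest := (List.nodup_cons.mp hnd).1
    by_cases hmem : calcVal i ∈ d.values
    · -- duplicate value: else branch, count -= 1
      rw [List.foldl_cons, step_dup d c i hmem, ih d (c - 1) hrest hndrest]
      have hadd : PySem.Set.add (PySem.Set.ofList d.values) (calcVal i)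
          = PySem.Set.ofList d.values :=
        PySem.Set.add_of_mem ((PySem.Set.mem_ofList _ _).mpr hmem)
      rw [List.map_cons, PySem.Set.update_cons, hadd]
      simp only [List.length_cons]
      push_cast
      ring
    · -- new value: inserted under the fresh key i, count += 1
      have hvals : (d.insert i (calcVal i)).values = d.values ++ [calcVal i] := by
        simp [PySem.Dict.values, PySem.Dict.items_insert_of_not_contains d (calcVal i) hdi]
      have hfresh' : ∀ j ∈ rest, (d.insert i (calcVal i)).contains j = false := by
        intro j hj
        rw [PySem.Dict.contains_insert]
        have : j ≠ i := fun h => hinotin (h ▸ hj)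
        simp [this, hrest j hj]
      rw [List.foldl_cons, step_new d c i hmem, ih _ (c + 1) hfresh' hndrest]
      have hnotin' : calcVal i ∉ PySem.Set.ofList d.values := fun h =>
        hmem ((PySem.Set.mem_ofList _ _).mp h)
      have hofl : PySem.Set.ofList (d.values ++ [calcVal i])
          = PySem.Set.ofList d.values ++ [calcVal i] := by
        rw [PySem.Set.ofList_append_singleton, PySem.Set.add_of_not_mem hnotin']
      have hupd : PySem.Set.update (PySem.Set.ofList d.values) ((i :: rest).map calcVal)
          = PySem.Set.update (PySem.Set.ofList d.values ++ [calcVal i]) (rest.map calcVal) := by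
        rw [List.map_cons, PySem.Set.update_cons, PySem.Set.add_of_not_mem hnotin']
      rw [hvals, hofl, hupd]
      simp only [List.length_cons, List.length_append, List.length_nil]
      push_cast
      ring

theorem nodup_pyRange_one (a b : Int) : (PySem.List.pyRange a b 1).Nodup := by
  rw [PySem.List.pyRange_of_pos a b (s := 1) (by norm_num)]
  exact (List.nodup_range).map (fun m n h => by omega)

-- ===== VERDICT (by name: the statement is the Claim_ definition above) =====
theorem calc_py_spec : Claim_equal_calc_py := by
  intro num _
  unfold Spec_calc_py calc_py calc_py_alt
  rw [calc_loop_count _ _ _ (by intro i _; rfl) (nodup_pyRange_one _ _)]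
  simp [PySem.Dict.empty, PySem.Dict.values, PySem.Set.update_nil_left]
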